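-- pv_equiv track=rewrite | github.com/Rithub14/IR-Resources | Ass3/group_008_p3/ir_core/stemming.py | is_consonant
-- ===== SOURCE A (Python) =====
-- def is_consonant(word, i):
--     """Check if character at position i is a consonant."""
--     if i < 0 or i >= len(word):
--         return False
--
--     char = word[i].lower()
--     if char in 'aeiou':
--         return False
--
--     # Y is a consonant unless preceded by a consonant
--     if char == 'y':
--         if i == 0:
--             return True
--         return not is_consonant(word, i - 1)
--
--     return True
-- ===== SOURCE B (Python) =====
-- def is_consonant(word, i):
--     """Check if character at position i is a consonant."""
--     if i < 0 or i >= len(word):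
--         return False
--     char = word[i].lower()
--     if char in 'aeiou':
--         return False
--     if char != 'y':
--         return True
--     # Find the start s of the consecutive run of 'y's ending at i,
--     # then decide by the character before the run and the run parity.
--     s = i
--     while s > 0 and word[s - 1].lower() == 'y':
--         s -= 1
--     base = True if s == 0 else word[s - 1].lower() in 'aeiou'
--     return base if (i - s) % 2 == 0 else not base
-- ===== Notes on version B (the rewrite author's own statement) =====
-- stated objective: alternative
-- what changed: Replaces A's recursion over all preceding characters on a 'y' by an explicit backward while-loop that finds the start of the consecutive y-run, then a closed-form parity decision from the character before the run.
import Mathlib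
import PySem

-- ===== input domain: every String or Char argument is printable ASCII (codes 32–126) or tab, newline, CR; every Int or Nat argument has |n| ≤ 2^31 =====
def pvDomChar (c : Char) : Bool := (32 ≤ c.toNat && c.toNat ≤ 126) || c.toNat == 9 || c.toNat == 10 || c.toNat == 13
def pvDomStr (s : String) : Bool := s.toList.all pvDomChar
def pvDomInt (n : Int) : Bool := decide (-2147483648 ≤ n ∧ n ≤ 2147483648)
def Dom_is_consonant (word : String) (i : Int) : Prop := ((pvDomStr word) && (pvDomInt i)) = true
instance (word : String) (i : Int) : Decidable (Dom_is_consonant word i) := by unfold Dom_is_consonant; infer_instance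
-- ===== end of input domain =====

-- B replaces A's recursion on a 'y' by a backward run-scan plus a parity formula (objective: alternative).

-- ===== PORT A =====
-- `char in 'aeiou'` for a single character
def pvIsVowel (c : Char) : Bool := c = 'a' || c = 'e' || c = 'i' || c = 'o' || c = 'u'

-- A's body after the range guard, recursing on the (in-range) index
def isConsAux (cs : List Char) : Nat → Bool
  | 0 =>
    let c := PySem.Chars.lowerChar (cs.getD 0 ' ')
    if pvIsVowel c then false
    else if c = 'y' then true
    else true
  | m + 1 =>
    let c := PySem.Chars.lowerChar (cs.getD (m + 1) ' ')
    if pvIsVowel c then false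
    else if c = 'y' then !(isConsAux cs m)
    else true

def is_consonant (word : String) (i : Int) : Bool :=
  if i < 0 ∨ (word.toList.length : Int) ≤ i then false
  else isConsAux word.toList i.toNat

-- ===== PORT B =====
-- the while loop: start of the consecutive run of 'y's ending at the given index
def pvRunStart (cs : List Char) : Nat → Nat
  | 0 => 0
  | s + 1 => if PySem.Chars.lowerChar (cs.getD s ' ') = 'y' then pvRunStart cs s else s + 1

-- B's body after the range guard
def altCore (cs : List Char) (n : Nat) : Bool :=
  let c := PySem.Chars.lowerChar (cs.getD n ' ')
  if pvIsVowel c then false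
  else if c ≠ 'y' then true
  else
    let s := pvRunStart cs n
    let base := if s = 0 then true else pvIsVowel (PySem.Chars.lowerChar (cs.getD (s - 1) ' '))
    if (n - s) % 2 = 0 then base else !base

def is_consonant_alt (word : String) (i : Int) : Bool :=
  if i < 0 ∨ (word.toList.length : Int) ≤ i then false
  else altCore word.toList i.toNat

-- ===== PRECONDITION & SPEC =====
def Spec_is_consonant (word : String) (i : Int) (out : Bool) : Prop := out = is_consonant_alt word i
instance (word : String) (i : Int) (out : Bool) : Decidable (Spec_is_consonant word i out) := by unfold Spec_is_consonant; infer_instance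

-- ===== CLAIM (what is proved, stated in full; the proofs are below) =====
def Claim_equal_is_consonant : Prop := ∀ (word : String) (i : Int), Dom_is_consonant word i → Spec_is_consonant word i (is_consonant word i)

-- ===== LEMMAS AND PROOFS =====

theorem pvRunStart_le (cs : List Char) (n : Nat) : pvRunStart cs n ≤ n := by
  induction n with
  | zero => simp [pvRunStart]
  | succ m ih =>
    simp only [pvRunStart]
    split
    · omega
    · omega

-- A's value at a non-'y' position, without case analysis on the index shape
theorem isConsAux_not_y (cs : List Char) (m : Nat)
    (h : PySem.Chars.lowerChar (cs.getD m ' ') ≠ 'y') :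
    isConsAux cs m = !(pvIsVowel (PySem.Chars.lowerChar (cs.getD m ' '))) := by
  cases m with
  | zero => simp only [isConsAux]; split_ifs <;> simp_all
  | succ k => simp only [isConsAux]; split_ifs <;> simp_all

theorem core_eq (cs : List Char) (n : Nat) : isConsAux cs n = altCore cs n := by
  induction n with
  | zero =>
    simp only [isConsAux, altCore, pvRunStart]
    split_ifs <;> simp_all
  | succ m ih =>
    by_cases hy : PySem.Chars.lowerChar (cs.getD (m + 1) ' ') = 'y'
    · have hnv : pvIsVowel (PySem.Chars.lowerChar (cs.getD (m + 1) ' ')) = false := by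
        rw [hy]; decide
      by_cases hpy : PySem.Chars.lowerChar (cs.getD m ' ') = 'y'
      · -- predecessor is 'y': run start is shared, parity flips
        have hr : pvRunStart cs (m + 1) = pvRunStart cs m := by
          simp only [pvRunStart]; rw [if_pos hpy]
        have hle : pvRunStart cs m ≤ m := pvRunStart_le cs m
        have hnvm : pvIsVowel (PySem.Chars.lowerChar (cs.getD m ' ')) = false := by
          rw [hpy]; decide
        simp only [isConsAux, altCore, hy, hr, hpy] at *
        simp only [ih]
        have hpar : (m + 1 - pvRunStart cs m) % 2 = 0 ↔ ¬ ((m - pvRunStart cs m) % 2 = 0) := by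
          omega
        by_cases hp : (m - pvRunStart cs m) % 2 = 0 <;>
          simp [hp, hpar.mpr, hpar] <;> simp_all
      · -- predecessor is not 'y': run starts here, base answers directly
        have hr : pvRunStart cs (m + 1) = m + 1 := by
          simp only [pvRunStart]; rw [if_neg hpy]
        have ha := isConsAux_not_y cs m hpy
        simp only [isConsAux, altCore, hy, hr, ha]
        simp
    · simp only [isConsAux, altCore]
      split_ifs <;> simp_all

-- ===== VERDICT (by name: the statement is the Claim_ definition above) =====
theorem is_consonant_spec : Claim_equal_is_consonant := by
  intro word i _
  unfold Spec_is_consonant is_consonant is_consonant_alt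
  split
  · rfl
  · exact core_eq word.toList i.toNat
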